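-- pv_equiv track=rewrite | github.com/millermeares/AdventOfCode | 2024/09/solve.py | get_next_file
-- ===== SOURCE A (Python) =====
-- def get_next_file(disk, last_index):
--   i = last_index
--   while i >= 1:
--     i -= 1
--     if disk[i] == '.':
--       continue
--     # found a non-empty space. check if this file is less than or equal to 'empty' space.
--     start_idx = i
--     c = disk[i]
--     for j in range(i, -1, -1):
--       if disk[j] == c:
--         start_idx = j
--       else:
--         break
--     return (start_idx, i)
--   return -1, -1 # no more files to move?
-- ===== SOURCE B (Python) =====
-- def get_next_file(disk, last_index):
--   # forward pass over maximal runs of equal cells in disk[0:last_index];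
--   # remember the bounds of the last run whose character is not '.'
--   result = (-1, -1)
--   start = 0
--   while start < last_index:
--     end = start
--     while end + 1 < last_index and disk[end + 1] == disk[start]:
--       end += 1
--     if disk[start] != '.':
--       result = (start, end)
--     start = end + 1
--   return result
-- ===== Notes on version B (the rewrite author's own statement) =====
-- stated objective: alternative
-- what changed: Replaces A's backward scan (skip dots from last_index-1, then a second inner backward scan extending the run) with a forward single pass that walks maximal runs of equal cells left-to-right and keeps the bounds of the last non-'.' run.
import Mathlib
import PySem

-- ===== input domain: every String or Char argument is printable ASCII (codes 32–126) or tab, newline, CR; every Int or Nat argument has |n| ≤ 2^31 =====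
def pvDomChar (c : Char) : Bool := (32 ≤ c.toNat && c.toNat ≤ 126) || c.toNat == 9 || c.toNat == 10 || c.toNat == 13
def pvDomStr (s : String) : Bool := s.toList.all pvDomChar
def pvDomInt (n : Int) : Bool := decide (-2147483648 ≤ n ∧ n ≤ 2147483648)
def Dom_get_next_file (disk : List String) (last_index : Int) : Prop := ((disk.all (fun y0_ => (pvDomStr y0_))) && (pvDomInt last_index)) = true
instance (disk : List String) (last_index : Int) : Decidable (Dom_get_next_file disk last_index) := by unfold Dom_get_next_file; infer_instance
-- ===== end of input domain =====

-- B replaces A's backward scan (skip '.' cells from last_index-1, then a second inner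
-- backward scan extending the run) by a forward single pass that walks maximal runs of
-- equal cells left-to-right and keeps the bounds of the last non-'.' run.
-- Return value only; neither version mutates its input.

-- ===== PORT A =====
-- inner 'for j in range(i, -1, -1)' of A with its break; js is the range list.
-- (out-of-range disk[j] would be an IndexError in Python; excluded by Pre_, returns start_idx here)
def pvInnerA (disk : List String) (c : String) : List Int → Int → Int
  | [], start_idx => start_idx
  | j :: rest, start_idx =>
      match PySem.List.pyGet? disk j with
      | none => start_idx
      | some s => if s == c then pvInnerA disk c rest j else start_idx

-- outer 'while i >= 1' of A, fueled (fuel ≥ i.toNat suffices since i decreases each step)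
def pvOuterA (disk : List String) : Nat → Int → Int × Int
  | 0, _ => (-1, -1)
  | fuel + 1, i =>
      if i ≥ 1 then
        let i' := i - 1
        match PySem.List.pyGet? disk i' with
        | none => (-1, -1)  -- IndexError in Python; excluded by Pre_
        | some s =>
          if s == "." then pvOuterA disk fuel i'
          else (pvInnerA disk s (PySem.List.pyRange i' (-1) (-1)) i', i')
      else (-1, -1)

def get_next_file (disk : List String) (last_index : Int) : Int × Int :=
  pvOuterA disk last_index.toNat last_index

-- ===== PORT B =====
-- inner 'while end + 1 < last_index and disk[end+1] == disk[start]' of Source B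
def pvExtendB (disk : List String) (last_index : Int) (c : String) (e : Int) : Int :=
  if _h : e + 1 < last_index then
    match PySem.List.pyGet? disk (e + 1) with
    | none => e  -- IndexError in Python; excluded by Pre_
    | some s => if s == c then pvExtendB disk last_index c (e + 1) else e
  else e
termination_by (last_index - e).toNat
decreasing_by omega

-- the port's outer loop needs 'start ≤ end' for termination; cited in decreasing_by below
theorem pvExtendB_ge (disk : List String) (last_index : Int) (c : String) (e : Int) :
    e ≤ pvExtendB disk last_index c e := by
  fun_induction pvExtendB disk last_index c e <;> omega

-- outer 'while start < last_index' of Source B, carrying result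
def pvOuterB (disk : List String) (last_index : Int) (start : Int) (res : Int × Int) : Int × Int :=
  if _h : start < last_index then
    match PySem.List.pyGet? disk start with
    | none => res  -- IndexError in Python; excluded by Pre_
    | some c =>
      let e := pvExtendB disk last_index c start
      pvOuterB disk last_index (e + 1) (if c != "." then (start, e) else res)
  else res
termination_by (last_index - start).toNat
decreasing_by have := pvExtendB_ge disk last_index c start; omega

def get_next_file_alt (disk : List String) (last_index : Int) : Int × Int :=
  pvOuterB disk last_index 0 (-1, -1)

-- ===== PRECONDITION & SPEC =====
-- A indexes disk[last_index-1] first; it raises IndexError exactly when last_index > len(disk)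
-- (and last_index ≥ 1); Pre_ excludes those inputs and nothing else.
def Pre_get_next_file (disk : List String) (last_index : Int) : Prop :=
  last_index ≤ (disk.length : Int)
instance (disk : List String) (last_index : Int) : Decidable (Pre_get_next_file disk last_index) := by
  unfold Pre_get_next_file; infer_instance
def pvWitness_get_next_file : List String × Int := (["0", ".", "1", "1"], 4)

def Spec_get_next_file (disk : List String) (last_index : Int) (out : Int × Int) : Prop := out = get_next_file_alt disk last_index
instance (disk : List String) (last_index : Int) (out : Int × Int) : Decidable (Spec_get_next_file disk last_index out) := by unfold Spec_get_next_file; infer_instance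

-- ===== CLAIM (what is proved, stated in full; the proofs are below) =====
def Claim_equal_get_next_file : Prop := ∀ (disk : List String) (last_index : Int), Dom_get_next_file disk last_index → Pre_get_next_file disk last_index → Spec_get_next_file disk last_index (get_next_file disk last_index)

-- ===== LEMMAS AND PROOFS =====

-- proof-side model of B's pass: forward run scan over a plain list with absolute offset
def runScanN : List String → Nat → Int × Int → Int × Int
  | [], _, res => res
  | x :: xs, pos, res =>
      runScanN (xs.dropWhile (· == x)) (pos + (xs.takeWhile (· == x)).length + 1)
        (if x == "." then res else ((pos : Int), ((pos + (xs.takeWhile (· == x)).length : Nat) : Int)))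
termination_by l => l.length
decreasing_by
  have := List.length_dropWhile_le (· == x) xs
  simp only [List.length_cons]; omega

-- proof-side model of A: skip dots from the right, then extend a run, on the reversed list
def aExtN (c : String) : List String → Int → Int
  | [], sidx => sidx
  | s :: rest, sidx => if s == c then aExtN c rest (sidx - 1) else sidx

def aScanN : List String → Int → Int × Int
  | [], _ => (-1, -1)
  | s :: rest, pos => if s == "." then aScanN rest (pos - 1) else (aExtN s rest pos, pos)

theorem dropWhile_eq_drop_tw {α : Type} (p : α → Bool) (l : List α) :
    l.dropWhile p = l.drop (l.takeWhile p).length := by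
  induction l with
  | nil => rfl
  | cons a l ih =>
      by_cases h : p a
      · simp [h, ih]
      · simp [h]

theorem len_tw_add_dw {α : Type} (p : α → Bool) (l : List α) :
    (l.takeWhile p).length + (l.dropWhile p).length = l.length := by
  conv_rhs => rw [← List.takeWhile_append_dropWhile (p := p) (l := l)]
  rw [List.length_append]

theorem aExtN_eq (c : String) (l : List String) : ∀ (p : Int),
    aExtN c l p = p - (l.takeWhile (· == c)).length := by
  induction l with
  | nil => intro p; simp [aExtN]
  | cons s rest ih =>
      intro p
      by_cases h : s == c
      · simp [aExtN, h, ih]; omega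
      · simp [aExtN, h]

theorem aScanN_all_dot (l : List String) : ∀ (p : Int),
    l.all (· == ".") = true → aScanN l p = (-1, -1) := by
  induction l with
  | nil => intro p _; rfl
  | cons s rest ih =>
      intro p h
      simp only [List.all_cons, Bool.and_eq_true] at h
      simp [aScanN, h.1, ih _ h.2]

-- appending a '.' cell never changes the forward run scan's recorded result
theorem runScanN_append_dot : ∀ (n : Nat) (l : List String) (pos : Nat) (res : Int × Int),
    l.length ≤ n → runScanN (l ++ ["."]) pos res = runScanN l pos res := by
  intro n
  induction n with
  | zero =>
      intro l pos res hl
      have : l = [] := List.eq_nil_of_length_eq_zero (by omega)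
      subst this
      simp [runScanN]
  | succ n ih =>
      intro l pos res hl
      match l with
      | [] => simp [runScanN]
      | y :: ys =>
          simp only [List.cons_append, runScanN]
          by_cases hall : List.dropWhile (· == y) ys = []
          · have htw : List.takeWhile (· == y) ys = ys := by
              have := List.takeWhile_append_dropWhile (p := (· == y)) (l := ys)
              rw [hall] at this; simpa using this
            by_cases hy : y = "."
            · subst hy
              have h1 : List.takeWhile (· == ".") (ys ++ ["."]) = ys ++ ["."] := by
                rw [List.takeWhile_append]
                simp [htw]
              have h2 : List.dropWhile (· == ".") (ys ++ ["."]) = [] := by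
                rw [List.dropWhile_append]
                simp [hall]
              rw [h1, h2, htw, hall]
              simp [runScanN]
            · have hyx : (("." : String) == y) = false := by
                simp [BEq.beq]; intro h; exact hy h.symm
              have h1 : List.takeWhile (· == y) (ys ++ ["."]) = ys := by
                rw [List.takeWhile_append]
                simp [htw, hyx]
              have h2 : List.dropWhile (· == y) (ys ++ ["."]) = ["."] := by
                rw [List.dropWhile_append]
                simp [hall, hyx]
              rw [h1, h2, htw, hall]
              simp [runScanN, hy]
          · have hlen : (List.takeWhile (· == y) ys).length ≠ ys.length := by
              have := len_tw_add_dw (· == y) ys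
              have hne : (List.dropWhile (· == y) ys).length ≠ 0 := by
                simpa [List.length_eq_zero_iff] using hall
              omega
            have h1 : List.takeWhile (· == y) (ys ++ ["."]) = List.takeWhile (· == y) ys := by
              rw [List.takeWhile_append, if_neg hlen]
            have h2 : List.dropWhile (· == y) (ys ++ ["."]) = List.dropWhile (· == y) ys ++ ["."] := by
              rw [List.dropWhile_append, if_neg (by simpa [List.isEmpty_iff] using hall)]
            rw [h1, h2]
            rw [ih (List.dropWhile (· == y) ys) _ _ (by
              have := List.length_dropWhile_le (· == y) ys
              simp only [List.length_cons] at hl; omega)]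

-- key length fact: prepending a block of y's (and a final y) does not change the
-- length of the x-run at the right end, provided the block is not an x-run extension
theorem tkw_len_append (x y : String) (u v : List String)
    (hv : ∀ s ∈ v, s = y) (hvne : v ≠ [])
    (hux : (List.takeWhile (· == x) u).length = u.length → (y == x) = false) :
    ((u ++ v).takeWhile (· == x)).length = (u.takeWhile (· == x)).length := by
  rw [List.takeWhile_append]
  by_cases hfull : (List.takeWhile (· == x) u).length = u.length
  · have hyx := hux hfull
    have hv' : List.takeWhile (· == x) v = [] := by
      match v with
      | [] => exact absurd rfl hvne
      | w :: v' =>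
          have hw : w = y := hv w (by simp)
          rw [List.takeWhile_cons, hw, hyx]
          simp
    rw [if_pos hfull, hv']
    simp [hfull]
  · rw [if_neg hfull]

-- appending a non-'.' cell x: the scan returns the run of x's at the right end
theorem runScanN_append (x : String) (hx : x ≠ ".") :
    ∀ (n : Nat) (l : List String) (pos : Nat) (res : Int × Int), l.length ≤ n →
    runScanN (l ++ [x]) pos res =
      (((pos + l.length : Nat) : Int) - ((l.reverse.takeWhile (· == x)).length : Int),
       ((pos + l.length : Nat) : Int)) := by
  intro n
  induction n with
  | zero =>
      intro l pos res hl
      have : l = [] := List.eq_nil_of_length_eq_zero (by omega)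
      subst this
      simp [runScanN, hx]
  | succ n ih =>
      intro l pos res hl
      match l with
      | [] => simp [runScanN, hx]
      | y :: ys =>
          simp only [List.cons_append, runScanN]
          by_cases hall : List.dropWhile (· == y) ys = []
          · have htw : List.takeWhile (· == y) ys = ys := by
              have := List.takeWhile_append_dropWhile (p := (· == y)) (l := ys)
              rw [hall] at this; simpa using this
            have hysy : ∀ s ∈ ys, s = y := by
              intro s hs
              have : s ∈ List.takeWhile (· == y) ys := by rw [htw]; exact hs
              have := List.mem_takeWhile_imp this
              simpa using this
            by_cases hxy : x = y
            · subst hxy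
              have hyne : x ≠ "." := hx
              have h1 : List.takeWhile (· == x) (ys ++ [x]) = ys ++ [x] := by
                rw [List.takeWhile_append]
                simp [htw]
              have h2 : List.dropWhile (· == x) (ys ++ [x]) = [] := by
                rw [List.dropWhile_append]
                simp [hall]
              rw [h1, h2]
              have hrev : List.takeWhile (· == x) (x :: ys).reverse = (x :: ys).reverse := by
                rw [List.takeWhile_eq_self_iff]
                intro a ha
                rw [List.mem_reverse] at ha
                rcases List.mem_cons.mp ha with h | h
                · simp [h]
                · simp [hysy a h]
              have hxb : (x == ".") = false := beq_eq_false_iff_ne.mpr hx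
              simp only [runScanN, hrev, hxb, Bool.false_eq_true, if_false]
              simp only [Prod.mk.injEq, List.length_reverse, List.length_append,
                List.length_cons, List.length_nil, and_true]
              omega
            · have hxyb : (x == y) = false := by simp [BEq.beq]; exact hxy
              have h1 : List.takeWhile (· == y) (ys ++ [x]) = ys := by
                rw [List.takeWhile_append]
                simp [htw, hxyb]
              have h2 : List.dropWhile (· == y) (ys ++ [x]) = [x] := by
                rw [List.dropWhile_append]
                simp [hall, hxyb]
              rw [h1, h2]
              have hstep : runScanN [x] (pos + ys.length + 1)
                  (if y == "." then res else ((pos : Int), ((pos + ys.length : Nat) : Int)))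
                  = (((pos + ys.length + 1 : Nat) : Int), ((pos + ys.length + 1 : Nat) : Int)) := by
                simp [runScanN, hx]
              have hrev : List.takeWhile (· == x) (y :: ys).reverse = [] := by
                rw [List.takeWhile_eq_nil_iff]
                intro h
                have hmem : (y :: ys).reverse.get ⟨0, h⟩ ∈ (y :: ys).reverse := List.get_mem _ _
                rw [List.mem_reverse] at hmem
                have h0 : (y :: ys).reverse.get ⟨0, h⟩ = y := by
                  rcases List.mem_cons.mp hmem with h' | h'
                  · exact h'
                  · exact hysy _ h'
                rw [h0]
                simp only [beq_iff_eq]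
                exact fun h => hxy h.symm
              rw [hstep, hrev]
              simp only [Prod.mk.injEq, List.length_nil, List.length_cons, Nat.cast_zero, and_true]
              push_cast
              omega
          · have hlen : (List.takeWhile (· == y) ys).length ≠ ys.length := by
              have := len_tw_add_dw (· == y) ys
              have hne : (List.dropWhile (· == y) ys).length ≠ 0 := by
                simpa [List.length_eq_zero_iff] using hall
              omega
            have h1 : List.takeWhile (· == y) (ys ++ [x]) = List.takeWhile (· == y) ys := by
              rw [List.takeWhile_append, if_neg hlen]
            have h2 : List.dropWhile (· == y) (ys ++ [x]) = List.dropWhile (· == y) ys ++ [x] := by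
              rw [List.dropWhile_append, if_neg (by simpa [List.isEmpty_iff] using hall)]
            rw [h1, h2]
            set t := List.takeWhile (· == y) ys with ht
            set d := List.dropWhile (· == y) ys with hd
            have hlen2 := len_tw_add_dw (· == y) ys
            rw [← ht, ← hd] at hlen2
            rw [ih d _ _ (by simp only [List.length_cons] at hl; omega)]
            -- the right-end x-run of (y :: ys) equals that of d
            have hrunlen : ((y :: ys).reverse.takeWhile (· == x)).length
                = (d.reverse.takeWhile (· == x)).length := by
              have hysplit : (y :: ys).reverse = d.reverse ++ (t.reverse ++ [y]) := by
                have : ys = t ++ d := (List.takeWhile_append_dropWhile (p := (· == y)) (l := ys)).symm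
                calc (y :: ys).reverse = ys.reverse ++ [y] := by simp
                  _ = (t ++ d).reverse ++ [y] := by rw [← this]
                  _ = d.reverse ++ (t.reverse ++ [y]) := by simp
              rw [hysplit]
              apply tkw_len_append x y
              · intro s hs
                rcases List.mem_append.mp hs with h' | h'
                · have := List.mem_takeWhile_imp (ht ▸ List.mem_reverse.mp h')
                  simpa using this
                · simpa using h'
              · simp
              · intro hfull
                -- d.reverse is all x's; head of d is not y, so x ≠ y
                have hdne : d ≠ [] := hall
                have hhead : ((d.head hdne) == y) = false := by
                  have := List.head_dropWhile_not (· == y) (l := ys) (w := hall)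
                  simpa [← hd] using this
                have hdall : List.takeWhile (· == x) d.reverse = d.reverse :=
                  List.IsPrefix.eq_of_length (List.takeWhile_prefix _) (by simpa using hfull)
                have hheadx : ((d.head hdne) == x) = true := by
                  have hmem : d.head hdne ∈ d.reverse := by
                    rw [List.mem_reverse]; exact List.head_mem hdne
                  rw [← hdall] at hmem
                  exact List.mem_takeWhile_imp (p := (· == x)) hmem
                -- so d.head = x and d.head ≠ y, hence y ≠ x
                have h1 : d.head hdne = x := by simpa using hheadx
                have h2 : d.head hdne ≠ y := by simpa using hhead
                simp [BEq.beq]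
                intro h
                exact h2 (h1.trans h.symm)
            rw [hrunlen]
            simp only [Prod.mk.injEq, List.length_cons, and_true, true_and]
            push_cast
            omega


-- the crux: the forward run scan equals A's backward skip-then-extend scan
theorem runScanN_eq_aScanN : ∀ (l : List String) (pos : Nat) (res : Int × Int),
    runScanN l pos res =
      if l.all (· == ".") then res else aScanN l.reverse ((pos : Int) + l.length - 1) := by
  intro l
  induction l using List.reverseRecOn with
  | nil => intro pos res; simp [runScanN]
  | append_singleton ys x ih =>
      intro pos res
      by_cases hx : x = "."
      · subst hx
        rw [runScanN_append_dot ys.length ys pos res le_rfl, ih]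
        have hall : (ys ++ ["."]).all (· == ".") = ys.all (· == ".") := by simp
        rw [hall]
        by_cases h : ys.all (· == ".")
        · rw [if_pos h, if_pos h]
        · rw [if_neg h, if_neg h]
          have : (ys ++ ["."]).reverse = "." :: ys.reverse := by simp
          rw [this]
          simp only [aScanN, List.length_append, List.length_singleton]
          rw [if_pos (by simp)]
          congr 1
          push_cast; ring
      · rw [runScanN_append (x := x) hx ys.length ys pos res le_rfl]
        have hxb : (x == ".") = false := by simp [BEq.beq]; exact hx
        have hall : (ys ++ [x]).all (· == ".") = false := by
          simp [List.all_append, hxb]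
        rw [hall, if_neg (by simp)]
        have : (ys ++ [x]).reverse = x :: ys.reverse := by simp
        rw [this]
        simp only [aScanN, hxb, Bool.false_eq_true, if_false, List.length_append,
          List.length_singleton]
        rw [aExtN_eq]
        simp only [Prod.mk.injEq]
        push_cast
        omega

-- ===== bridge: port B computes the forward run scan over the prefix =====

theorem bridge_ext (disk : List String) (L : Int) (c : String) :
    ∀ (n : Nat) (e : Nat), (L.toNat - e) ≤ n → (L.toNat : Int) ≤ (disk.length : Int) →
    pvExtendB disk L c (e : Int)
      = ((e + (((disk.take L.toNat).drop (e + 1)).takeWhile (· == c)).length : Nat) : Int) := by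
  intro n
  induction n with
  | zero =>
      intro e hn hlen
      rw [pvExtendB]
      rw [dif_neg (by omega)]
      have : (disk.take L.toNat).drop (e + 1) = [] := by
        apply List.drop_eq_nil_of_le
        have := List.length_take_le L.toNat disk
        omega
      rw [this]
      simp
  | succ n ih =>
      intro e hn hlen
      rw [pvExtendB]
      by_cases h : (e : Int) + 1 < L
      · rw [dif_pos h]
        have he1 : e + 1 < L.toNat := by omega
        have helen : e + 1 < disk.length := by omega
        have hget : PySem.List.pyGet? disk ((e : Int) + 1) = some disk[e + 1] := by
          have : ((e : Int) + 1) = ((e + 1 : Nat) : Int) := by push_cast; ring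
          rw [this, PySem.List.pyGet?_natCast]
          exact List.getElem?_eq_getElem helen
        rw [hget]
        show (if (disk[e + 1] == c) = true then pvExtendB disk L c ((e : Int) + 1) else (e : Int))
          = ((e + (((disk.take L.toNat).drop (e + 1)).takeWhile (· == c)).length : Nat) : Int)
        have hseg : (disk.take L.toNat).drop (e + 1)
            = disk[e + 1] :: (disk.take L.toNat).drop (e + 2) := by
          have hlt : e + 1 < (disk.take L.toNat).length := by
            rw [List.length_take]; omega
          rw [List.drop_eq_getElem_cons hlt]
          congr 1
          exact List.getElem_take
        by_cases hc : disk[e + 1] == c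
        · rw [if_pos hc]
          have : (e : Int) + 1 = ((e + 1 : Nat) : Int) := by push_cast; ring
          rw [this, ih (e + 1) (by omega) hlen]
          simp [hseg, List.takeWhile_cons, hc]
          rw [show e + 1 + 1 = e + 2 by omega]
          push_cast
          omega
        · rw [if_neg (by simpa using hc)]
          rw [hseg, List.takeWhile_cons]
          rw [if_neg (by simpa using hc)]
          simp
      · rw [dif_neg h]
        have : (disk.take L.toNat).drop (e + 1) = [] := by
          apply List.drop_eq_nil_of_le
          rw [List.length_take]; omega
        rw [this]
        simp

theorem bridge_outer (disk : List String) (L : Int) :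
    ∀ (n : Nat) (s : Nat) (res : Int × Int), (L.toNat - s) ≤ n → (L.toNat : Int) ≤ (disk.length : Int) →
    pvOuterB disk L (s : Int) res = runScanN ((disk.take L.toNat).drop s) s res := by
  intro n
  induction n with
  | zero =>
      intro s res hn hlen
      rw [pvOuterB, dif_neg (by omega)]
      have : (disk.take L.toNat).drop s = [] := by
        apply List.drop_eq_nil_of_le
        have := List.length_take_le L.toNat disk
        omega
      rw [this]
      simp [runScanN]
  | succ n ih =>
      intro s res hn hlen
      by_cases h : (s : Int) < L
      · rw [pvOuterB, dif_pos h]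
        have hs : s < L.toNat := by omega
        have hslen : s < disk.length := by omega
        have hget : PySem.List.pyGet? disk (s : Int) = some disk[s] := by
          rw [PySem.List.pyGet?_natCast]; exact List.getElem?_eq_getElem hslen
        rw [hget]
        show pvOuterB disk L (pvExtendB disk L disk[s] (s : Int) + 1)
            (if (disk[s] != ".") = true then ((s : Int), pvExtendB disk L disk[s] (s : Int)) else res)
          = _
        rw [bridge_ext disk L disk[s] (L.toNat - s) s le_rfl hlen]
        have hseg : (disk.take L.toNat).drop s
            = disk[s] :: (disk.take L.toNat).drop (s + 1) := by
          have hlt : s < (disk.take L.toNat).length := by rw [List.length_take]; omega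
          rw [List.drop_eq_getElem_cons hlt]
          congr 1
          exact List.getElem_take
        rw [hseg, runScanN]
        set k := (((disk.take L.toNat).drop (s + 1)).takeWhile (· == disk[s])).length with hk
        have hdw : ((disk.take L.toNat).drop (s + 1)).dropWhile (· == disk[s])
            = (disk.take L.toNat).drop (s + 1 + k) := by
          rw [dropWhile_eq_drop_tw, List.drop_drop, ← hk]
          try congr 1
          try omega
        rw [hdw]
        have hres : (if (disk[s] != ".") = true then ((s : Int), ((s + k : Nat) : Int)) else res)
            = (if (disk[s] == ".") = true then res else ((s : Int), ((s + k : Nat) : Int))) := by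
          by_cases hdot : disk[s] == "."
          · simp [bne, hdot]
          · simp [bne, hdot]
        rw [hres]
        have hcast : ((s + k : Nat) : Int) + 1 = ((s + 1 + k : Nat) : Int) := by push_cast; ring
        have hpos : s + k + 1 = s + 1 + k := by omega
        rw [hcast, hpos]
        exact ih (s + 1 + k) _ (by omega) hlen
      · rw [pvOuterB, dif_neg h]
        have hnil : (disk.take L.toNat).drop s = [] := by
          apply List.drop_eq_nil_of_le
          rw [List.length_take]
          omega
        rw [hnil]
        simp [runScanN]

-- ===== bridge: port A computes the backward skip-then-extend scan over the prefix =====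

theorem bridge_inner (disk : List String) (c : String) :
    ∀ (n : Nat), n ≤ disk.length →
    pvInnerA disk c (PySem.List.pyRange ((n : Int) - 1) (-1) (-1)) (n : Int)
      = aExtN c (disk.take n).reverse (n : Int) := by
  intro n
  induction n with
  | zero =>
      intro _
      rw [PySem.List.pyRange_neg_one_eq_nil (by omega)]
      simp [pvInnerA, aExtN]
  | succ n ih =>
      intro hlen
      have hrange : PySem.List.pyRange (((n : Nat) + 1 : Int) - 1) (-1) (-1)
          = (n : Int) :: PySem.List.pyRange ((n : Int) - 1) (-1) (-1) := by
        have : (((n : Nat) + 1 : Int) - 1) = (n : Int) := by push_cast; ring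
        rw [this, PySem.List.pyRange_neg_one_cons (by omega)]
      have hn' : ((n + 1 : Nat) : Int) - 1 = ((n : Nat) + 1 : Int) - 1 := by push_cast; ring
      rw [hn', hrange]
      have hget : PySem.List.pyGet? disk (n : Int) = some disk[n] := by
        rw [PySem.List.pyGet?_natCast]; exact List.getElem?_eq_getElem (Nat.lt_of_succ_le hlen)
      have htake : (disk.take (n + 1)).reverse = disk[n] :: (disk.take n).reverse := by
        rw [List.take_succ]
        have : disk[n]? = some disk[n] := List.getElem?_eq_getElem (Nat.lt_of_succ_le hlen)
        rw [this]
        simp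
      rw [htake]
      simp only [pvInnerA, hget, aExtN]
      by_cases hc : disk[n] == c
      · rw [if_pos hc, if_pos hc]
        have : ((n + 1 : Nat) : Int) - 1 = (n : Int) := by push_cast; ring
        rw [this, ih (by omega)]
      · rw [if_neg (by simpa using hc), if_neg (by simpa using hc)]

theorem bridge_a (disk : List String) :
    ∀ (fuel : Nat) (i : Int), i.toNat ≤ fuel → 0 ≤ i → i ≤ (disk.length : Int) →
    pvOuterA disk fuel i = aScanN (disk.take i.toNat).reverse (i - 1) := by
  intro fuel
  induction fuel with
  | zero =>
      intro i h0 h1 _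
      have : i = 0 := by omega
      subst this
      simp [pvOuterA, aScanN]
  | succ n ih =>
      intro i hf h0 hlen
      by_cases h1 : i ≥ 1
      · rw [pvOuterA, if_pos h1]
        have hi1 : i - 1 = ((i.toNat - 1 : Nat) : Int) := by omega
        have hlt : i.toNat - 1 < disk.length := by omega
        have hget : PySem.List.pyGet? disk (i - 1) = some disk[i.toNat - 1] := by
          rw [hi1, PySem.List.pyGet?_natCast]; exact List.getElem?_eq_getElem hlt
        show (match PySem.List.pyGet? disk (i - 1) with
              | none => ((-1 : Int), (-1 : Int))
              | some s =>
                  if (s == ".") = true then pvOuterA disk n (i - 1)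
                  else (pvInnerA disk s (PySem.List.pyRange (i - 1) (-1) (-1)) (i - 1), i - 1))
            = _
        rw [hget]
        have htake : ∀ (m : Nat) (hm : m < disk.length),
            (disk.take (m + 1)).reverse = disk[m]'hm :: (disk.take m).reverse := by
          intro m hm
          rw [List.take_succ]
          have : disk[m]? = some (disk[m]'hm) := List.getElem?_eq_getElem hm
          rw [this]
          simp
        conv_rhs => rw [show i.toNat = (i.toNat - 1) + 1 by omega]
        rw [htake (i.toNat - 1) hlt]
        simp only [aScanN]
        by_cases hdot : disk[i.toNat - 1] == "."
        · rw [if_pos hdot, if_pos hdot]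
          rw [ih (i - 1) (by omega) (by omega) (by omega)]
          have : (i - 1).toNat = i.toNat - 1 := by omega
          rw [this]
          try congr 1
          try omega
        · rw [if_neg (by simpa using hdot), if_neg (by simpa using hdot)]
          have hinner := bridge_inner disk disk[i.toNat - 1] (i.toNat - 1) (by omega)
          have h2 : ((i.toNat - 1 : Nat) : Int) - 1 = i - 2 := by omega
          have h3 : ((i.toNat - 1 : Nat) : Int) = i - 1 := by omega
          rw [h2, h3] at hinner
          -- A's inner scan first looks at j = i - 1 where the cell is the run character
          have hfirst : pvInnerA disk disk[i.toNat - 1] (PySem.List.pyRange (i - 1) (-1) (-1)) (i - 1)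
              = pvInnerA disk disk[i.toNat - 1] (PySem.List.pyRange (i - 2) (-1) (-1)) (i - 1) := by
            rw [PySem.List.pyRange_neg_one_cons (by omega)]
            simp only [pvInnerA, hget]
            rw [if_pos (by simp)]
            rw [show i - 1 - 1 = i - 2 by ring]
          rw [hfirst, hinner]
      · rw [pvOuterA, if_neg h1]
        have : i = 0 := by omega
        subst this
        simp [aScanN]

-- ===== VERDICT (by name: the statement is the Claim_ definition above) =====
theorem get_next_file_spec : Claim_equal_get_next_file := by
  intro disk last_index _ hpre
  unfold Spec_get_next_file get_next_file get_next_file_alt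
  by_cases h0 : 0 ≤ last_index
  · have hL : (last_index.toNat : Int) ≤ (disk.length : Int) := by
      have : (last_index.toNat : Int) = last_index := by omega
      rw [this]; exact hpre
    have hb := bridge_outer disk last_index last_index.toNat 0 (-1, -1) (by omega) hL
    rw [List.drop_zero] at hb
    rw [Nat.cast_zero] at hb
    have hc := runScanN_eq_aScanN (disk.take last_index.toNat) 0 (-1, -1)
    have hlentake : ((disk.take last_index.toNat).length : Int) = last_index := by
      rw [List.length_take]
      omega
    rw [Nat.cast_zero, hlentake, zero_add] at hc
    have ha := bridge_a disk last_index.toNat last_index le_rfl h0 hpre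
    rw [ha, hb, hc]
    by_cases hall : (disk.take last_index.toNat).all (· == ".")
    · rw [if_pos hall]
      exact aScanN_all_dot _ _ (by simpa using hall)
    · rw [if_neg hall]
  · -- last_index < 0: both loops never run
    have ht : last_index.toNat = 0 := by omega
    rw [ht]
    rw [pvOuterB, dif_neg (by omega)]
    simp [pvOuterA]
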